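-- pv_equiv track=rewrite | github.com/DonQueso89/aoc | 2018/day8.py | resolve_sum_indexes
-- ===== SOURCE A (Python) =====
-- def resolve_sum_indexes(tree):
--     num_children, num_metadata = tree.pop(), tree.pop()
--     child_metadata = []
--     for i in range(num_children):
--         tree, metadata = resolve_sum_indexes(tree)
--         child_metadata.append(metadata)
--
--     total_metadata = 0
--     if num_children:
--         for i in range(num_metadata):
--             try:
--                 idx = tree.pop()
--                 if idx > 0:
--                     total_metadata += child_metadata[idx - 1]
--             except IndexError:
--                 # reference to non-existing child
--                 pass
--     else:
--         total_metadata += sum([tree.pop() for x in range(num_metadata)])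
--
--     return tree, total_metadata
-- ===== SOURCE B (Python) =====
-- def resolve_sum_indexes(tree):
--     # Pure recursive-descent parser over the REVERSED serialization (header first),
--     # consuming from the front with slices instead of A's end-popping mutation;
--     # the metadata rule is a filtered comprehension instead of a try/except loop.
--     # Note: unlike A, this does not mutate `tree` in place; the equivalence claimed
--     # is about the RETURN value only.
--     def parse(s):
--         nc, nm, s = s[0], s[1], s[2:]
--         if nc:
--             vals = []
--             for _ in range(nc):
--                 v, s = parse(s)
--                 vals.append(v)
--             k = max(nm, 0)
--             meta, s = s[:k], s[k:]
--             total = sum(vals[i - 1] for i in meta if 1 <= i <= len(vals))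
--         else:
--             total = 0
--             for _ in range(nm):
--                 total += s[0]
--                 s = s[1:]
--         return total, s
--
--     total, rest = parse(tree[::-1])
--     return rest[::-1], total
-- ===== Notes on version B (the rewrite author's own statement) =====
-- stated objective: alternative
-- what changed: A's end-popping, list-mutating recursion with try/except is replaced by a pure recursive-descent parser over the reversed list: the header is read from the front, children are parsed into a list, the metadata block is taken with slices, and the index rule is a filtered comprehension instead of a try/except pop loop; B does not mutate the input (return value only).
import Mathlib
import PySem

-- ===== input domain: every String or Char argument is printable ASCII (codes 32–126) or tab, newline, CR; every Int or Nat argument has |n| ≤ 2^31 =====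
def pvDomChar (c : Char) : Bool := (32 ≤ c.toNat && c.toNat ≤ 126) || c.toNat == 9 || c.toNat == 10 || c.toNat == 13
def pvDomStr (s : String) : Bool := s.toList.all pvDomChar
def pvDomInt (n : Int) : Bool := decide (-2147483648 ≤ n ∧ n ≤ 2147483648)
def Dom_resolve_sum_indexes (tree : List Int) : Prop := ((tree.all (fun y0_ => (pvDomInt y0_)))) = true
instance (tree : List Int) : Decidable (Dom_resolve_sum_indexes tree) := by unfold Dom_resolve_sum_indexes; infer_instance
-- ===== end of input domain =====

-- B replaces A's end-popping mutating recursion by a pure recursive-descent parser over the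
-- reversed list, consuming from the front with slices (different decomposition, same cost).
-- A mutates `tree` in place (pops from it); B does not — the theorem is about the RETURN value.

-- ===== PORT A =====
-- A's internal-node metadata loop: `for i in range(num_metadata): try: idx = tree.pop(); if idx > 0: total += child_metadata[idx-1] except IndexError: pass`
def metaA : Nat → List Int → List Int → Int → List Int × Int
  | 0, t, _, acc => (t, acc)
  | n+1, t, cm, acc =>
    match PySem.List.pop? t with
    | none => metaA n t cm acc            -- pop on empty list: IndexError caught, loop continues
    | some (idx, t') =>
      if 0 < idx then
        match PySem.List.pyGet? cm (idx - 1) with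
        | some w => metaA n t' cm (acc + w)
        | none => metaA n t' cm acc       -- child_metadata[idx-1] out of range: caught, pass
      else metaA n t' cm acc

-- needed by the port's termination/length proofs
theorem metaA_length (n : Nat) : ∀ (t cm : List Int) (acc : Int), (metaA n t cm acc).1.length ≤ t.length := by
  induction n with
  | zero => intro t cm acc; simp [metaA]
  | succ n ih =>
    intro t cm acc
    simp only [metaA]
    rcases h : PySem.List.pop? t with _ | ⟨idx, t'⟩
    · dsimp only; exact ih t cm acc
    · dsimp only
      have hl : t'.length + 1 = t.length := PySem.List.length_of_pop?_eq_some t h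
      split_ifs with h1
      · rcases hg : PySem.List.pyGet? cm (idx - 1) with _ | w
        · dsimp only; have := ih t' cm acc; omega
        · dsimp only; have := ih t' cm (acc + w); omega
      · have := ih t' cm acc; omega

-- A's leaf: `sum([tree.pop() for x in range(num_metadata)])` — collect the pops, then sum
def popListA : Nat → List Int → Option (List Int × List Int)
  | 0, t => some ([], t)
  | n+1, t =>
    match PySem.List.pop? t with
    | none => none                        -- IndexError NOT caught in the leaf branch
    | some (x, t') => (popListA n t').map (fun r => (x :: r.1, r.2))

theorem popListA_length (n : Nat) : ∀ (t : List Int) (r : List Int × List Int), popListA n t = some r → r.2.length ≤ t.length := by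
  induction n with
  | zero => intro t r h; simp [popListA] at h; simp [← h]
  | succ n ih =>
    intro t r h
    simp only [popListA] at h
    split at h
    · exact absurd h (by simp)
    · rename_i x t' hp
      have hl : t'.length + 1 = t.length := PySem.List.length_of_pop?_eq_some t hp
      rcases hq : popListA n t' with _ | r' <;> rw [hq] at h
      · simp at h
      · simp at h
        have := ih t' r' hq
        rw [← h]; show r'.2.length ≤ t.length; omega

-- the recursive function itself; the subtype bound (result tree is ≥ 2 shorter) feeds termination
mutual
def goA (t : List Int) : Option {r : (List Int × Int) // r.1.length + 2 ≤ t.length} :=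
    match h1 : PySem.List.pop? t with
    | none => none                                        -- tree.pop() raises
    | some (nc, t1) =>
      match h2 : PySem.List.pop? t1 with
      | none => none
      | some (nm, t2) =>
        match childA nc.toNat t2 [] with                  -- for i in range(num_children)
        | none => none
        | some ⟨(t', cm), hl⟩ =>
          if nc ≠ 0 then                                  -- `if num_children:` (truthiness)
            some ⟨metaA nm.toNat t' cm 0, by
              have hm := metaA_length nm.toNat t' cm 0
              have hl' : t'.length ≤ t2.length := hl
              have e1 : t1.length + 1 = t.length := PySem.List.length_of_pop?_eq_some t h1
              have e2 : t2.length + 1 = t1.length := PySem.List.length_of_pop?_eq_some t1 h2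
              show (metaA nm.toNat t' cm 0).1.length + 2 ≤ t.length; omega⟩
          else
            match h3 : popListA nm.toNat t' with
            | none => none
            | some (xs, t'') =>
              some ⟨(t'', 0 + xs.sum), by
                have hm : t''.length ≤ t'.length := popListA_length nm.toNat t' _ h3
                have hl' : t'.length ≤ t2.length := hl
                have e1 : t1.length + 1 = t.length := PySem.List.length_of_pop?_eq_some t h1
                have e2 : t2.length + 1 = t1.length := PySem.List.length_of_pop?_eq_some t1 h2
                show t''.length + 2 ≤ t.length; omega⟩
  termination_by (t.length, 0)
  decreasing_by
    · have e1 : t1.length + 1 = t.length := PySem.List.length_of_pop?_eq_some t h1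
      have e2 : t2.length + 1 = t1.length := PySem.List.length_of_pop?_eq_some t1 h2
      apply Prod.Lex.left; omega

def childA (n : Nat) (t : List Int) (vals : List Int) : Option {r : (List Int × List Int) // r.1.length ≤ t.length} :=
    match n with
    | 0 => some ⟨(t, vals), Nat.le_refl _⟩
    | n+1 =>
      match goA t with
      | none => none
      | some ⟨(t', m), h⟩ =>
        match childA n t' (vals ++ [m]) with
        | none => none
        | some ⟨r, h2⟩ => some ⟨r, by
            have h' : t'.length + 2 ≤ t.length := h
            exact Nat.le_trans h2 (by omega)⟩
  termination_by (t.length, n + 1)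
  decreasing_by
    · apply Prod.Lex.right; omega
    · apply Prod.Lex.left
      have h' : t'.length + 2 ≤ t.length := h
      omega
end

def resolve_sum_indexes (tree : List Int) : List Int × Int :=
  match goA tree with
  | some r => r.val
  | none => ([], 0)           -- Python raises IndexError here: excluded by Pre_

-- ===== PORT B =====
-- `sum(vals[i - 1] for i in meta if 1 <= i <= len(vals))`
def metaValB (vals ms : List Int) : Int :=
  ((ms.filter (fun i => decide (1 ≤ i) && decide (i ≤ (vals.length : Int)))).map
    (fun i => (PySem.List.pyGet? vals (i - 1)).getD 0)).sum

-- B's leaf loop: `for _ in range(nm): total += s[0]; s = s[1:]` (s[0] on empty raises)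
def leafB : Nat → List Int → Int → Option (Int × List Int)
  | 0, s, total => some (total, s)
  | _+1, [], _ => none
  | n+1, x :: s, total => leafB n s (total + x)

theorem leafB_length (n : Nat) : ∀ (s : List Int) (total : Int) (r : Int × List Int), leafB n s total = some r → r.2.length ≤ s.length := by
  induction n with
  | zero => intro s total r h; simp [leafB] at h; simp [← h]
  | succ n ih =>
    intro s total r h
    cases s with
    | nil => simp [leafB] at h
    | cons x s =>
      have := ih s (total + x) r h
      simp only [List.length_cons]; omega

-- `parse(s)`: header from the front, then children, then the metadata slice
mutual
def parseB (s : List Int) : Option {r : Int × List Int // r.2.length + 2 ≤ s.length} :=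
    match s with
    | [] => none                          -- s[0] raises
    | [_] => none                         -- s[1] raises
    | nc :: nm :: s2 =>
      if nc ≠ 0 then
        match childrenB nc.toNat s2 with
        | none => none
        | some ⟨(vals, s3), h3⟩ =>
          some ⟨(metaValB vals (s3.take nm.toNat), s3.drop nm.toNat), by
            show (s3.drop nm.toNat).length + 2 ≤ (nc :: nm :: s2).length
            have h4 : s3.length ≤ s2.length := h3
            simp only [List.length_drop, List.length_cons]; omega⟩
      else
        match h : leafB nm.toNat s2 0 with
        | none => none
        | some (total, s3) =>
          some ⟨(total, s3), by
            show s3.length + 2 ≤ (nc :: nm :: s2).length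
            have h4 : s3.length ≤ s2.length := leafB_length nm.toNat s2 0 (total, s3) h
            simp only [List.length_cons]; omega⟩
  termination_by (s.length, 0)
  decreasing_by
    apply Prod.Lex.left; simp only [List.length_cons]; omega

def childrenB (n : Nat) (s : List Int) : Option {r : List Int × List Int // r.2.length ≤ s.length} :=
    match n with
    | 0 => some ⟨([], s), Nat.le_refl _⟩
    | n+1 =>
      match parseB s with
      | none => none
      | some ⟨(v, s'), h⟩ =>
        match childrenB n s' with
        | none => none
        | some ⟨(vs, s''), h2⟩ => some ⟨(v :: vs, s''), by
            show s''.length ≤ s.length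
            have h' : s'.length + 2 ≤ s.length := h
            have h2' : s''.length ≤ s'.length := h2
            omega⟩
  termination_by (s.length, n + 1)
  decreasing_by
    · apply Prod.Lex.right; omega
    · apply Prod.Lex.left
      have h' : s'.length + 2 ≤ s.length := h
      omega
end

def resolve_sum_indexes_alt (tree : List Int) : List Int × Int :=
  match parseB tree.reverse with          -- parse(tree[::-1])
  | none => ([], 0)                       -- Python raises IndexError here: excluded by Pre_
  | some ⟨(total, rest), _⟩ => (rest.reverse, total)

-- ===== PRECONDITION & SPEC =====
-- Pre_ is membership in the grammar of well-formed serializations — a SHAPE condition on the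
-- list (like balanced-parenthesis membership, it has no non-recursive closed form).  shapeS
-- accepts exactly the shape [children..., metadata..., num_metadata, num_children] read from the
-- end: frames are (children_still_to_read, num_metadata); a frame's metadata may be truncated
-- (Python catches IndexError there) while a leaf (num_children = 0) demands all its metadata
-- entries.  It computes no values of either program.  The Nat argument only makes the recursion
-- structurally decreasing (kernel-computable); 2*len+3 exceeds the number of steps on any input,
-- so it never truncates a well-formed input.
def shapeS : Nat → List (Nat × Int) → List Int → Option (List Int)
  | 0, _, _ => none
  | _+1, [], t => some t
  | fuel+1, (0, nm) :: st, t => shapeS fuel st (t.take (t.length - nm.toNat))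
  | fuel+1, (n+1, nm) :: st, t =>
    match PySem.List.pop? t with
    | none => none
    | some (c, t1) =>
      match PySem.List.pop? t1 with
      | none => none
      | some (m, t2) =>
        if c = 0 then
          if m.toNat ≤ t2.length then shapeS fuel ((n, nm) :: st) (t2.take (t2.length - m.toNat)) else none
        else shapeS fuel ((c.toNat, m) :: (n, nm) :: st) t2

-- Pre_ excludes exactly the inputs on which Python A raises IndexError (malformed serializations).
def Pre_resolve_sum_indexes (tree : List Int) : Prop :=
  (shapeS (2 * tree.length + 3) [(1, 0)] tree).isSome = true
instance (tree : List Int) : Decidable (Pre_resolve_sum_indexes tree) := by unfold Pre_resolve_sum_indexes; infer_instance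

def pvWitness_resolve_sum_indexes : List Int := [10, 11, 2, 0]

def Spec_resolve_sum_indexes (tree : List Int) (out : List Int × Int) : Prop := out = resolve_sum_indexes_alt tree
instance (tree : List Int) (out : List Int × Int) : Decidable (Spec_resolve_sum_indexes tree out) := by unfold Spec_resolve_sum_indexes; infer_instance

-- ===== CLAIM (what is proved, stated in full; the proofs are below) =====
def Claim_equal_resolve_sum_indexes : Prop := ∀ (tree : List Int), Dom_resolve_sum_indexes tree → Pre_resolve_sum_indexes tree → Spec_resolve_sum_indexes tree (resolve_sum_indexes tree)

-- ===== LEMMAS AND PROOFS =====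

-- subtype-free views of A's recursion
def gA (t : List Int) : Option (List Int × Int) := (goA t).map Subtype.val
def cA (n : Nat) (t : List Int) (vals : List Int) : Option (List Int × List Int) := (childA n t vals).map Subtype.val

-- A's per-node finalization (after the children), as a plain function
def finA (nc nm : Int) (t cm : List Int) : Option (List Int × Int) :=
  if nc ≠ 0 then some (metaA nm.toNat t cm 0)
  else (popListA nm.toNat t).map (fun r => (r.2, 0 + r.1.sum))

theorem gA_eq (t : List Int) : gA t =
    match PySem.List.pop? t with
    | none => none
    | some (nc, t1) =>
      match PySem.List.pop? t1 with
      | none => none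
      | some (nm, t2) =>
        match cA nc.toNat t2 [] with
        | none => none
        | some (t', cm) => finA nc nm t' cm := by
  unfold gA
  rw [goA.eq_def]
  split
  · rename_i h1
    conv_rhs => rw [h1]
    rfl
  · rename_i nc t1 h1
    conv_rhs => rw [h1]
    dsimp only
    split
    · rename_i h2
      conv_rhs => rw [h2]
      rfl
    · rename_i nm t2 h2
      conv_rhs => rw [h2]
      dsimp only
      rcases hc : childA nc.toNat t2 [] with _ | ⟨⟨⟨t', cm⟩, hl⟩⟩
      · unfold cA; rw [hc]; rfl
      · unfold cA; rw [hc]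
        simp only [Option.map_some]
        unfold finA
        split_ifs with hnc
        · simp only [Option.map_some]
        · split
          · rename_i h3
            conv_rhs => rw [h3]
            rfl
          · rename_i xs t'' h3
            conv_rhs => rw [h3]
            rfl

theorem cA_zero (t vals : List Int) : cA 0 t vals = some (t, vals) := by
  simp [cA, childA]

theorem cA_succ (n : Nat) (t vals : List Int) : cA (n+1) t vals =
    match gA t with
    | none => none
    | some (t', m) => cA n t' (vals ++ [m]) := by
  conv_lhs => unfold cA
  rw [childA.eq_def]
  dsimp only
  unfold gA
  rcases hg : goA t with _ | ⟨⟨⟨t', m⟩, h⟩⟩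
  · rfl
  · simp only [Option.map_some]
    unfold cA
    rcases hc : childA n t' (vals ++ [m]) with _ | ⟨r, h2⟩ <;> rfl

theorem metaA_nil (n : Nat) : ∀ (cm : List Int) (acc : Int), metaA n [] cm acc = ([], acc) := by
  induction n with
  | zero => intro cm acc; rfl
  | succ n ih =>
    intro cm acc
    have hp : PySem.List.pop? ([] : List Int) = none := rfl
    simp only [metaA, hp]
    exact ih cm acc

-- subtype-free views of B's recursion
def pB (s : List Int) : Option (Int × List Int) := (parseB s).map Subtype.val
def cB (n : Nat) (s : List Int) : Option (List Int × List Int) := (childrenB n s).map Subtype.val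

theorem pB_eq (s : List Int) : pB s =
    match s with
    | [] => none
    | [_] => none
    | nc :: nm :: s2 =>
      if nc ≠ 0 then
        match cB nc.toNat s2 with
        | none => none
        | some (vals, s3) => some (metaValB vals (s3.take nm.toNat), s3.drop nm.toNat)
      else leafB nm.toNat s2 0 := by
  unfold pB
  rw [parseB.eq_def]
  match s with
  | [] => rfl
  | [_] => rfl
  | nc :: nm :: s2 =>
    dsimp only
    split_ifs with hnc
    · rcases hc : childrenB nc.toNat s2 with _ | ⟨⟨⟨vals, s3⟩, h3⟩⟩
      · unfold cB; rw [hc]; rfl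
      · unfold cB; rw [hc]; rfl
    · split
      · rename_i h2; rw [h2]; rfl
      · rename_i total s3 h2
        conv_rhs => rw [h2]
        rfl

theorem cB_zero (s : List Int) : cB 0 s = some ([], s) := by
  simp [cB, childrenB]

theorem cB_succ (n : Nat) (s : List Int) : cB (n+1) s =
    match pB s with
    | none => none
    | some (v, s') => (cB n s').map (fun r => (v :: r.1, r.2)) := by
  conv_lhs => unfold cB
  rw [childrenB.eq_def]
  dsimp only
  unfold pB
  rcases hg : parseB s with _ | ⟨⟨⟨v, s'⟩, h⟩⟩
  · rfl
  · simp only [Option.map_some]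
    unfold cB
    rcases hc : childrenB n s' with _ | ⟨⟨⟨vs, s''⟩, h2⟩⟩ <;> rfl

theorem pB_length (s : List Int) (v : Int) (s' : List Int) (h : pB s = some (v, s')) : s'.length + 2 ≤ s.length := by
  unfold pB at h
  rcases hg : parseB s with _ | ⟨⟨⟨v0, s0⟩, hh⟩⟩ <;> rw [hg] at h
  · simp at h
  · simp at h
    obtain ⟨h1, h2⟩ := h
    subst h2
    exact hh

-- one filtered-comprehension step
theorem metaValB_cons (vals : List Int) (x : Int) (r : List Int) :
    metaValB vals (x :: r) =
      (if 1 ≤ x ∧ x ≤ (vals.length : Int) then (PySem.List.pyGet? vals (x - 1)).getD 0 else 0)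
      + metaValB vals r := by
  unfold metaValB
  rw [List.filter_cons]
  by_cases h : 1 ≤ x ∧ x ≤ (vals.length : Int)
  · rw [if_pos (by simp [h.1, h.2]), if_pos h]
    simp
  · have : ¬ ((decide (1 ≤ x) && decide (x ≤ (vals.length : Int))) = true) := by
      simp only [Bool.and_eq_true, decide_eq_true_eq]; exact h
    rw [if_neg this, if_neg h]
    simp

-- A's internal metadata loop over t = B's filtered comprehension over t.reverse
theorem meta_bridge (n : Nat) : ∀ (t cm : List Int) (acc : Int),
    metaA n t cm acc = ((t.reverse.drop n).reverse, acc + metaValB cm (t.reverse.take n)) := by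
  induction n with
  | zero =>
    intro t cm acc
    simp [metaA, metaValB]
  | succ n ih =>
    intro t cm acc
    rcases List.eq_nil_or_concat' t with rfl | ⟨q, x, rfl⟩
    · rw [metaA_nil]
      simp [metaValB]
    · have hrev : (q ++ [x]).reverse = x :: q.reverse := by simp
      simp only [metaA, PySem.List.pop?_last, hrev, List.drop_succ_cons, List.take_succ_cons,
        metaValB_cons]
      by_cases hpos : 0 < x
      · have h0 : (0 : Int) ≤ x - 1 := by omega
        rw [if_pos hpos, PySem.List.pyGet?_of_nonneg cm h0]
        by_cases hle : x ≤ (cm.length : Int)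
        · have hlt : (x - 1).toNat < cm.length := by omega
          rw [List.getElem?_eq_getElem hlt]
          dsimp only
          rw [ih q cm (acc + cm[(x - 1).toNat])]
          rw [if_pos ⟨by omega, hle⟩]
          simp [add_assoc]
        · have hge : cm.length ≤ (x - 1).toNat := by omega
          rw [List.getElem?_eq_none hge]
          dsimp only
          rw [ih q cm acc]
          rw [if_neg (by omega)]
          simp
      · rw [if_neg hpos, ih q cm acc, if_neg (by omega)]
        simp

-- A's leaf pops over t = B's front loop over t.reverse
theorem leaf_bridge (n : Nat) : ∀ (t : List Int) (acc : Int),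
    leafB n t.reverse acc = (popListA n t).map (fun r => (acc + r.1.sum, r.2.reverse)) := by
  induction n with
  | zero => intro t acc; simp [leafB, popListA]
  | succ n ih =>
    intro t acc
    rcases List.eq_nil_or_concat' t with rfl | ⟨q, x, rfl⟩
    · have hp : PySem.List.pop? ([] : List Int) = none := rfl
      simp [leafB, popListA, hp]
    · have hrev : (q ++ [x]).reverse = x :: q.reverse := by simp
      simp only [popListA, PySem.List.pop?_last, hrev, leafB]
      rw [ih q (acc + x)]
      rcases hq : popListA n q with _ | ⟨xs, t''⟩
      · simp
      · simp [add_assoc]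

-- the children bridge, given the node bridge for all lists of length ≤ N
theorem c_bridge (N : Nat)
    (ihg : ∀ u : List Int, u.length ≤ N → gA u = (pB u.reverse).map (fun p => (p.2.reverse, p.1))) :
    ∀ (n : Nat) (t vals : List Int), t.length ≤ N →
      cA n t vals =
        match cB n t.reverse with
        | none => none
        | some (vs, s) => some (s.reverse, vals ++ vs) := by
  intro n
  induction n with
  | zero =>
    intro t vals hN
    rw [cA_zero, cB_zero]
    simp
  | succ n ih =>
    intro t vals hN
    rw [cA_succ, cB_succ, ihg t hN]
    rcases hp : pB t.reverse with _ | ⟨m, s'⟩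
    · rfl
    · simp only [Option.map_some]
      have hlen : s'.length + 2 ≤ t.reverse.length := pB_length t.reverse m s' hp
      have hN' : s'.reverse.length ≤ N := by simp at hlen ⊢; omega
      rw [ih s'.reverse (vals ++ [m]) hN']
      rw [List.reverse_reverse]
      rcases hc : cB n s' with _ | ⟨vs, s2⟩
      · rfl
      · simp

-- the node bridge: A's recursion over t = B's parser over t.reverse
theorem g_bridge : ∀ (t : List Int), gA t = (pB t.reverse).map (fun p => (p.2.reverse, p.1)) := by
  intro t
  induction hN : t.length using Nat.strong_induction_on generalizing t with
  | _ N ih =>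
  subst hN
  rw [gA_eq]
  match hrv : t.reverse with
  | [] =>
    have ht : t = [] := by simpa using congrArg List.reverse hrv
    subst ht
    have hp : PySem.List.pop? ([] : List Int) = none := rfl
    rw [hp, pB_eq]
    rfl
  | [x] =>
    have ht : t = [x] := by
      have := congrArg List.reverse hrv
      simpa using this
    subst ht
    have h1 : PySem.List.pop? [x] = some (x, []) := by
      have := PySem.List.pop?_last (xs := ([] : List Int)) (x := x)
      simpa using this
    have hp : PySem.List.pop? ([] : List Int) = none := rfl
    rw [h1]
    dsimp only
    rw [hp, pB_eq]
    rfl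
  | x :: y :: s2 =>
    have ht : t = (s2.reverse ++ [y]) ++ [x] := by
      have := congrArg List.reverse hrv
      simpa using this
    have h1 : PySem.List.pop? t = some (x, s2.reverse ++ [y]) := by
      rw [ht]; exact PySem.List.pop?_last _ _
    have h2 : PySem.List.pop? (s2.reverse ++ [y]) = some (y, s2.reverse) := PySem.List.pop?_last _ _
    rw [h1]; dsimp only
    rw [h2]; dsimp only
    have hlen : s2.length < t.length := by
      have : t.length = t.reverse.length := by simp
      rw [this, hrv]; simp
    have ihg : ∀ u : List Int, u.length ≤ s2.length →
        gA u = (pB u.reverse).map (fun p => (p.2.reverse, p.1)) := by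
      intro u hu
      exact ih u.length (by omega) u rfl
    rw [c_bridge s2.length ihg x.toNat s2.reverse [] (by simp)]
    rw [List.reverse_reverse]
    rw [pB_eq]
    dsimp only
    by_cases hx : x ≠ 0
    · rw [if_pos hx]
      rcases hc : cB x.toNat s2 with _ | ⟨vs, s3⟩
      · rfl
      · dsimp only
        simp only [List.nil_append]
        unfold finA
        rw [if_pos hx]
        rw [meta_bridge y.toNat s3.reverse vs 0]
        simp
    · rw [if_neg hx]
      rw [not_not] at hx
      subst hx
      rw [show ((0 : Int).toNat) = 0 from rfl, cB_zero]
      dsimp only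
      unfold finA
      rw [if_neg (by simp)]
      have hlb := leaf_bridge y.toNat s2.reverse 0
      rw [List.reverse_reverse] at hlb
      rw [hlb]
      rcases hq : popListA y.toNat s2.reverse with _ | ⟨xs, t''⟩
      · rfl
      · simp

theorem resolve_eq_alt (tree : List Int) : resolve_sum_indexes tree = resolve_sum_indexes_alt tree := by
  have hA : resolve_sum_indexes tree = (gA tree).getD ([], 0) := by
    unfold resolve_sum_indexes gA
    cases goA tree <;> rfl
  have hB : resolve_sum_indexes_alt tree =
      ((pB tree.reverse).map (fun p => (p.2.reverse, p.1))).getD ([], 0) := by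
    unfold resolve_sum_indexes_alt pB
    rcases h : parseB tree.reverse with _ | ⟨⟨⟨total, rest⟩, hh⟩⟩ <;> rfl
  rw [hA, hB, g_bridge]

-- ===== VERDICT (by name: the statement is the Claim_ definition above) =====
theorem resolve_sum_indexes_spec : Claim_equal_resolve_sum_indexes := by
  intro tree _ _
  unfold Spec_resolve_sum_indexes
  exact resolve_eq_alt tree
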